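-- pv_equiv track=rewrite | github.com/spuriosity/jog | jog.py | fuzzy_match_indices
-- ===== SOURCE A (Python) =====
-- def fuzzy_match_indices(pattern, text):
--     """Return the set of character indices in text that match the fuzzy pattern.
--
--     Returns None if the pattern doesn't match at all.
--     """
--     if not pattern:
--         return set()
--     p = pattern.lower()
--     t = text.lower()
--     pi = 0
--     indices = set()
--     for i, ch in enumerate(t):
--         if pi < len(p) and ch == p[pi]:
--             indices.add(i)
--             pi += 1
--     if pi == len(p):
--         return indices
--     return None
-- ===== SOURCE B (Python) =====
-- def fuzzy_match_indices(pattern, text):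
--     """Return the set of character indices in text that match the fuzzy pattern.
--
--     Returns None if the pattern doesn't match at all.
--     """
--     t = text.lower()
--     pos = 0
--     indices = set()
--     for ch in pattern.lower():
--         idx = t.find(ch, pos)
--         if idx == -1:
--             return None
--         indices.add(idx)
--         pos = idx + 1
--     return indices
-- ===== Notes on version B (the rewrite author's own statement) =====
-- stated objective: alternative
-- what changed: B inverts the traversal: instead of A's single scan over every text character carrying a pattern index, B iterates over the pattern characters and jumps through the lowercased text with str.find(ch, pos), so control flow is driven by the pattern and unmatched text stretches are skipped by find.
import Mathlib
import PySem

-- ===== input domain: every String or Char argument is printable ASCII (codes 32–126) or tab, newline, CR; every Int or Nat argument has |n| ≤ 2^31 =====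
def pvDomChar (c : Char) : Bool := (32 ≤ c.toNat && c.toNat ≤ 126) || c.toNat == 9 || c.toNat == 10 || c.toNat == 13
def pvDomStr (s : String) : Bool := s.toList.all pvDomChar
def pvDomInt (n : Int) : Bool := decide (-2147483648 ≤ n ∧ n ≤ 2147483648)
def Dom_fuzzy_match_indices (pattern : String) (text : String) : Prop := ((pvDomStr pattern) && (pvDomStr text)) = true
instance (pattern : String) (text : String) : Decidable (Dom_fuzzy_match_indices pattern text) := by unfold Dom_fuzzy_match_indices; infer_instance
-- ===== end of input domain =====

-- B iterates the PATTERN, jumping through the text with str.find(ch, pos), instead of A's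
-- scan over every text character; same return value, objective: alternative decomposition.


-- ===== PORT A =====
-- A's loop body: 'if pi < len(p) and ch == p[pi]: indices.add(i); pi += 1'
-- (the guard pi < len(p) makes the index access in range, so the total pyGetD is exact here)
def pvAStep (p : List Char) (st : Int × PySem.Set Int) (ic : Int × Char) : Int × PySem.Set Int :=
  if st.1 < (p.length : Int) ∧ ic.2 = PySem.List.pyGetD p st.1 ' ' then
    (st.1 + 1, PySem.Set.add st.2 ic.1)
  else st

def fuzzy_match_indices (pattern : String) (text : String) : Option (List Int) :=
  if pattern = "" then some PySem.Set.empty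
  else
    let p := PySem.Chars.lower pattern.toList
    let t := PySem.Chars.lower text.toList
    let st := (PySem.List.enumerate t).foldl (pvAStep p) (0, PySem.Set.empty)
    if st.1 = (p.length : Int) then some st.2 else none

-- ===== PORT B =====
-- Source B's loop: for ch in pattern.lower(): idx = t.find(ch, pos); …
def pvAltLoop (t : List Char) : List Char → Int → PySem.Set Int → Option (List Int)
  | [], _, out => some out
  | ch :: rest, pos, out =>
    let idx := PySem.Chars.findFrom t [ch] pos
    if idx = -1 then none
    else pvAltLoop t rest (idx + 1) (PySem.Set.add out idx)

def fuzzy_match_indices_alt (pattern : String) (text : String) : Option (List Int) :=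
  pvAltLoop (PySem.Chars.lower text.toList) (PySem.Chars.lower pattern.toList) 0 PySem.Set.empty

-- ===== PRECONDITION & SPEC =====
def Spec_fuzzy_match_indices (pattern : String) (text : String) (out : Option (List Int)) : Prop := out = fuzzy_match_indices_alt pattern text
instance (pattern : String) (text : String) (out : Option (List Int)) : Decidable (Spec_fuzzy_match_indices pattern text out) := by unfold Spec_fuzzy_match_indices; infer_instance

-- ===== CLAIM (what is proved, stated in full; the proofs are below) =====
def Claim_equal_fuzzy_match_indices : Prop := ∀ (pattern : String) (text : String), Dom_fuzzy_match_indices pattern text → Spec_fuzzy_match_indices pattern text (fuzzy_match_indices pattern text)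

-- ===== LEMMAS AND PROOFS =====

lemma pv_single_prefix_cons {a b : Char} {l : List Char} : [a] <+: b :: l ↔ a = b := by
  simp [List.cons_prefix_cons]

lemma pv_find_single_nil (q : Char) : PySem.Chars.find [] [q] = -1 := by
  rw [PySem.Chars.find_eq_neg_one_iff]; simp

lemma pv_find_single_cons (c q : Char) (s : List Char) :
    PySem.Chars.find (c :: s) [q] =
      if c = q then 0
      else if PySem.Chars.find s [q] = -1 then -1 else PySem.Chars.find s [q] + 1 := by
  by_cases hc : c = q
  · subst hc
    have hin : [c] <:+: (c :: s) := List.IsPrefix.isInfix ⟨s, rfl⟩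
    have h0 : (0:Int) ≤ PySem.Chars.find (c :: s) [c] :=
      (PySem.Chars.find_nonneg_iff (c :: s) [c]).mpr hin
    obtain ⟨hpre, hmin⟩ := PySem.Chars.find_spec h0
    have hz : (PySem.Chars.find (c :: s) [c]).toNat = 0 := by
      by_contra hne
      exact hmin 0 (Nat.pos_of_ne_zero hne) ⟨s, rfl⟩
    rw [if_pos rfl]
    omega
  · simp only [if_neg hc]
    by_cases hr : PySem.Chars.find s [q] = -1
    · simp only [if_pos hr]
      rw [PySem.Chars.find_eq_neg_one_iff]
      intro hin
      rcases List.infix_cons_iff.mp hin with hp | hi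
      · exact hc (pv_single_prefix_cons.mp hp).symm
      · exact (PySem.Chars.find_eq_neg_one_iff s [q]).mp hr hi
    · simp only [if_neg hr]
      have h0 : (0:Int) ≤ PySem.Chars.find s [q] := by
        have := PySem.Chars.neg_one_le_find s [q]; omega
      obtain ⟨hpre, hmin⟩ := PySem.Chars.find_spec h0
      have hins : [q] <:+: s :=
        hpre.isInfix.trans (List.drop_suffix _ s).isInfix
      have hin : [q] <:+: (c :: s) := List.infix_cons hins
      have h0' : (0:Int) ≤ PySem.Chars.find (c :: s) [q] :=
        (PySem.Chars.find_nonneg_iff (c :: s) [q]).mpr hin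
      obtain ⟨hpre', hmin'⟩ := PySem.Chars.find_spec h0'
      set r := PySem.Chars.find s [q] with hrdef
      set F := PySem.Chars.find (c :: s) [q] with hFdef
      have hnone : ∀ i, i ≤ r.toNat → ¬ [q] <+: (c :: s).drop i := by
        intro i hi
        match i with
        | 0 => simpa [pv_single_prefix_cons] using fun h => hc h.symm
        | (j+1) =>
          simp only [List.drop_succ_cons]
          exact hmin j (by omega)
      have hge : r.toNat + 1 ≤ F.toNat := by
        by_contra hlt
        exact hnone F.toNat (by omega) hpre'
      have hle : F.toNat ≤ r.toNat + 1 := by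
        by_contra hlt
        have hp1 : [q] <+: (c :: s).drop (r.toNat + 1) := by
          simpa [List.drop_succ_cons] using hpre
        exact hmin' (r.toNat + 1) (by omega) hp1
      omega

-- the loop invariant: A's fold over the remaining enumerated text, started with pi = done.length
-- where p = done ++ rest, computes exactly B's pattern-driven loop on rest from cursor k
lemma pv_loop_eq (t p : List Char) :
    ∀ (s : List Char) (k : Nat) (done rest : List Char) (acc : PySem.Set Int),
      t.drop k = s → k ≤ t.length → done ++ rest = p →
      pvAltLoop t rest (k : Int) acc =
        (let st := (PySem.List.enumerate s (k : Int)).foldl (pvAStep p) ((done.length : Int), acc)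
         if st.1 = (p.length : Int) then some st.2 else none) := by
  intro s
  induction s with
  | nil =>
    intro k done rest acc hdrop hk hp
    have hkl : k = t.length := by
      have := List.drop_eq_nil_iff.mp hdrop; omega
    cases rest with
    | nil =>
      simp [pvAltLoop, PySem.List.enumerate, ← hp]
    | cons q qs =>
      have hfind : PySem.Chars.findFrom t [q] (k : Int) = -1 := by
        rw [PySem.Chars.findFrom_natCast t [q] k hk, hdrop, pv_find_single_nil]
        simp
      have hlen : (done.length : Int) ≠ (p.length : Int) := by
        rw [← hp]; simp; omega
      simp [pvAltLoop, hfind, PySem.List.enumerate, hlen]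
  | cons c s' ih =>
    intro k done rest acc hdrop hk hp
    have hklt : k < t.length := by
      by_contra hge
      rw [List.drop_eq_nil_of_le (by omega)] at hdrop
      simp at hdrop
    have hdrop' : t.drop (k + 1) = s' := by
      have : t.drop (k + 1) = (t.drop k).drop 1 := by
        rw [List.drop_drop]
      rw [this, hdrop]; rfl
    rw [PySem.List.enumerate_cons]
    cases rest with
    | nil =>
      -- pattern exhausted: the guard pi < len(p) is false for this step and, via ih, for the rest
      have hdone : done = p := by simpa using hp
      have hstep : pvAStep p ((done.length : Int), acc) ((k : Int), c) = ((done.length : Int), acc) := by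
        unfold pvAStep
        dsimp only
        rw [if_neg]
        rintro ⟨hlt, -⟩
        rw [hdone] at hlt
        simp at hlt
      have := ih (k + 1) done [] acc hdrop' (by omega) hp
      simp only [pvAltLoop] at this ⊢
      rw [List.foldl_cons, hstep]
      have hcast : ((k : Int) + 1) = ((k + 1 : Nat) : Int) := by push_cast; ring
      rw [hcast]
      exact this
    | cons q qs =>
      have hdlt : done.length < p.length := by rw [← hp]; simp
      have hget : PySem.List.pyGetD p ((done.length : Int)) ' ' = q := by
        rw [PySem.List.pyGetD_natCast, ← hp]
        simp [List.getD_eq_getElem?_getD]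
      have hfk := PySem.Chars.findFrom_natCast t [q] k (by omega)
      have hfk1 := PySem.Chars.findFrom_natCast t [q] (k + 1) (by omega)
      rw [hdrop] at hfk
      rw [hdrop'] at hfk1
      by_cases hcq : c = q
      · -- text char matches: both sides consume q at index k
        have hguard : pvAStep p ((done.length : Int), acc) ((k : Int), c) =
            ((done.length : Int) + 1, PySem.Set.add acc (k : Int)) := by
          unfold pvAStep
          dsimp only
          rw [if_pos ⟨by simpa using hdlt, by simp [hget, hcq]⟩]
        have hfind0 : PySem.Chars.find (c :: s') [q] = 0 := by
          rw [pv_find_single_cons, if_pos hcq]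
        have hfindk : PySem.Chars.findFrom t [q] (k : Int) = (k : Int) := by
          rw [hfk, hfind0]; simp
        have hne : ((k : Int)) ≠ -1 := by omega
        have := ih (k + 1) (done ++ [q]) qs (PySem.Set.add acc (k : Int)) hdrop' (by omega)
          (by rw [← hp]; simp)
        simp only [pvAltLoop, hfindk, if_neg hne]
        rw [List.foldl_cons, hguard]
        have hcast1 : ((k : Int) + 1) = ((k + 1 : Nat) : Int) := by push_cast; ring
        have hcast2 : ((done.length : Int) + 1) = (((done ++ [q]).length : Nat) : Int) := by
          simp
        rw [hcast1, hcast2]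
        exact this
      · -- no match at index k: A skips the char, B's find from k equals find from k+1
        have hguard : pvAStep p ((done.length : Int), acc) ((k : Int), c) = ((done.length : Int), acc) := by
          unfold pvAStep
          rw [if_neg]
          rintro ⟨-, hch⟩
          simp [hget] at hch
          exact hcq hch
        have hfc := pv_find_single_cons c q s'
        rw [if_neg hcq] at hfc
        have := ih (k + 1) done (q :: qs) acc hdrop' (by omega) hp
        rw [List.foldl_cons, hguard]
        have hcast1 : ((k : Int) + 1) = ((k + 1 : Nat) : Int) := by push_cast; ring
        by_cases hr : PySem.Chars.find s' [q] = -1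
        · have hfindk : PySem.Chars.findFrom t [q] (k : Int) = -1 := by
            rw [hfk, hfc, if_pos hr]; simp
          have hfindk1 : PySem.Chars.findFrom t [q] ((k + 1 : Nat) : Int) = -1 := by
            rw [hfk1, if_pos hr]
          rw [hcast1]
          simp only [pvAltLoop, hfindk, hfindk1] at this ⊢
          exact this
        · have hr0 : (0:Int) ≤ PySem.Chars.find s' [q] := by
            have := PySem.Chars.neg_one_le_find s' [q]; omega
          have hfindk : PySem.Chars.findFrom t [q] (k : Int) =
              (k : Int) + (PySem.Chars.find s' [q] + 1) := by
            rw [hfk, hfc, if_neg hr]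
            rw [if_neg (by omega)]
          have hfindk1 : PySem.Chars.findFrom t [q] ((k + 1 : Nat) : Int) =
              ((k + 1 : Nat) : Int) + PySem.Chars.find s' [q] := by
            rw [hfk1, if_neg hr]
          rw [hcast1]
          simp only [pvAltLoop, hfindk, hfindk1] at this ⊢
          rw [if_neg (by omega)]
          rw [if_neg (by omega)] at this
          have harith : (k : Int) + (PySem.Chars.find s' [q] + 1) =
              ((k : Int) + 1) + PySem.Chars.find s' [q] := by ring
          rw [harith]
          push_cast at this
          exact this

-- ===== VERDICT (by name: the statement is the Claim_ definition above) =====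
theorem fuzzy_match_indices_spec : Claim_equal_fuzzy_match_indices := by
  intro pattern text _hdom
  unfold Spec_fuzzy_match_indices fuzzy_match_indices fuzzy_match_indices_alt
  by_cases hpat : pattern = ""
  · subst hpat
    simp [PySem.Chars.lower, pvAltLoop]
  · rw [if_neg hpat]
    have hpl : PySem.Chars.lower pattern.toList =
        [] ++ PySem.Chars.lower pattern.toList := rfl
    have := pv_loop_eq (PySem.Chars.lower text.toList) (PySem.Chars.lower pattern.toList)
      (PySem.Chars.lower text.toList) 0 [] (PySem.Chars.lower pattern.toList)
      PySem.Set.empty (by simp) (by omega) (by simp)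
    simp only [Nat.cast_zero] at this
    rw [this]
    rfl
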